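-- pv_equiv track=rewrite | github.com/fishy15/competitive_programming | icpc/nac/2023/splitting_pairs.py | all_rems
-- ===== SOURCE A (Python) =====
-- from itertools import combinations
--
-- def all_rems(lst, sz):
-- 	n = len(lst)
-- 	for idxs in combinations(range(n), sz):
-- 		res = []
-- 		for i, x in enumerate(lst):
-- 			if i not in idxs:
-- 				res += [x]
-- 		yield res
-- ===== SOURCE B (Python) =====
-- def all_rems(lst, sz):
--     # Recursive drop-or-keep enumeration over the list structure (no itertools):
--     # at each element, first drop it (if budget left), then keep it.
--     def go(rest, k):
--         if not rest:
--             return [[]] if k == 0 else []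
--         out = go(rest[1:], k - 1) if k > 0 else []
--         out += [[rest[0]] + r for r in go(rest[1:], k)]
--         return out
--     yield from go(list(lst), sz)
-- ===== Notes on version B (the rewrite author's own statement) =====
-- stated objective: alternative
-- what changed: Replaces itertools.combinations over index tuples plus an inner enumerate/membership filter by a direct drop-or-keep recursion on the list carrying the remaining drop budget.
import Mathlib
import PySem

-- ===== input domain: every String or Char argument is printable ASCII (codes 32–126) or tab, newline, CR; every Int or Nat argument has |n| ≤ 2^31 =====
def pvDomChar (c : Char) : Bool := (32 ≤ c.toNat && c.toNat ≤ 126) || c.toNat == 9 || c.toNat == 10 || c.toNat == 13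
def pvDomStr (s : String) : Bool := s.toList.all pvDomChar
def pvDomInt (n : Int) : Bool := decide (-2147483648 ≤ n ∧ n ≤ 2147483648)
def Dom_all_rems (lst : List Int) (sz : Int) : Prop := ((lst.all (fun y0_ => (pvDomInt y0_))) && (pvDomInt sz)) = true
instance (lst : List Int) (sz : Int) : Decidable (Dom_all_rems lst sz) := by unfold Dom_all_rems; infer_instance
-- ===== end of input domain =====

-- B replaces itertools.combinations + an enumerate/membership filter by a direct
-- drop-or-keep recursion on the list carrying the remaining drop budget (alternative
-- decomposition, same output order). Equivalence is about the returned sequence of lists.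

-- ===== PORT A =====
-- port of itertools.combinations(xs, k): all k-subsequences of xs in lexicographic order
def combsA (xs : List Int) (k : Nat) : List (List Int) :=
  match k, xs with
  | 0, _ => [[]]
  | _+1, [] => []
  | k+1, x :: rest => (combsA rest k).map (fun t => x :: t) ++ combsA rest (k+1)

def all_rems (lst : List Int) (sz : Int) : List (List Int) :=
  let n := lst.length
  if sz < 0 then []  -- combinations raises ValueError here; excluded by Pre_all_rems
  else
    (combsA (PySem.List.pyRange 0 (n : Int) 1) sz.toNat).map (fun idxs =>
      (PySem.List.enumerate lst 0).foldl
        (fun res p => if p.1 ∉ idxs then res ++ [p.2] else res) [])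

-- ===== PORT B =====
-- drop-or-keep recursion of Source B's `go`
def goB (rest : List Int) (k : Int) : List (List Int) :=
  match rest with
  | [] => if k = 0 then [[]] else []
  | x :: xs => (if k > 0 then goB xs (k - 1) else []) ++ (goB xs k).map (fun r => x :: r)

def all_rems_alt (lst : List Int) (sz : Int) : List (List Int) := goB lst sz

-- ===== PRECONDITION & SPEC =====
-- A (a generator) raises ValueError when iterated with negative sz; only that is excluded.
def Pre_all_rems (_lst : List Int) (sz : Int) : Prop := 0 ≤ sz
instance (lst : List Int) (sz : Int) : Decidable (Pre_all_rems lst sz) := by unfold Pre_all_rems; infer_instance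
def pvWitness_all_rems : List Int × Int := ([1, 2, 3], 2)

def Spec_all_rems (lst : List Int) (sz : Int) (out : List (List Int)) : Prop := out = all_rems_alt lst sz
instance (lst : List Int) (sz : Int) (out : List (List Int)) : Decidable (Spec_all_rems lst sz out) := by unfold Spec_all_rems; infer_instance

-- ===== CLAIM (what is proved, stated in full; the proofs are below) =====
def Claim_equal_all_rems : Prop := ∀ (lst : List Int) (sz : Int), Dom_all_rems lst sz → Pre_all_rems lst sz → Spec_all_rems lst sz (all_rems lst sz)

-- ===== LEMMAS AND PROOFS =====

-- recursive characterisation of A's inner filter loop, starting at index o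
def kfA (o : Int) (lst : List Int) (idxs : List Int) : List Int :=
  match lst with
  | [] => []
  | x :: xs => if o ∉ idxs then x :: kfA (o + 1) xs idxs else kfA (o + 1) xs idxs

theorem foldl_eq_kfA (lst : List Int) : ∀ (o : Int) (idxs acc : List Int),
    (PySem.List.enumerate lst o).foldl
      (fun res p => if p.1 ∉ idxs then res ++ [p.2] else res) acc = acc ++ kfA o lst idxs := by
  induction lst with
  | nil => intro o idxs acc; simp [PySem.List.enumerate_nil, kfA]
  | cons x xs ih =>
    intro o idxs acc
    rw [PySem.List.enumerate_cons, List.foldl_cons, ih]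
    by_cases h : o ∈ idxs <;> simp [kfA, h]

theorem kfA_skip_lt (xs : List Int) : ∀ (o j : Int) (js : List Int), j < o →
    kfA o xs (j :: js) = kfA o xs js := by
  induction xs with
  | nil => intro o j js _; simp [kfA]
  | cons x t ih =>
    intro o j js h
    have hne : o ≠ j := by omega
    by_cases hm : o ∈ js <;> simp [kfA, hm, hne, ih _ _ _ (by omega : j < o + 1)]

theorem kfA_shift (xs : List Int) : ∀ (o : Int) (js : List Int),
    kfA (o + 1) xs (js.map (fun j => j + 1)) = kfA o xs js := by
  induction xs with
  | nil => intro o js; simp [kfA]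
  | cons x t ih =>
    intro o js
    have hmem : (o + 1 ∈ js.map (fun j => j + 1)) ↔ o ∈ js := by
      constructor
      · intro h
        rcases List.mem_map.mp h with ⟨b, hb, hbe⟩
        have : b = o := by omega
        simpa [this] using hb
      · intro h; exact List.mem_map.mpr ⟨o, h, rfl⟩
    by_cases hm : o ∈ js <;>
      simp [kfA, hm, ih (o + 1) js, hmem]

theorem kfA_nil_idxs (lst : List Int) : ∀ (o : Int), kfA o lst [] = lst := by
  induction lst with
  | nil => intro o; simp [kfA]
  | cons x xs ih => intro o; simp [kfA, ih]

theorem goB_zero (lst : List Int) : goB lst 0 = [lst] := by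
  induction lst with
  | nil => simp [goB]
  | cons x xs ih => simp [goB, ih]

theorem combsA_map_add_one (xs : List Int) : ∀ (k : Nat),
    combsA (xs.map (fun j => j + 1)) k = (combsA xs k).map (List.map (fun j => j + 1)) := by
  induction xs with
  | nil => intro k; cases k <;> simp [combsA]
  | cons x t ih =>
    intro k
    cases k with
    | zero => simp [combsA]
    | succ k =>
      simp [combsA, ih k, ih (k + 1), List.map_map, List.map_append, Function.comp]

theorem mem_mem_combsA (xs : List Int) : ∀ (k : Nat) (js : List Int),
    js ∈ combsA xs k → ∀ j ∈ js, j ∈ xs := by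
  induction xs with
  | nil =>
    intro k js hjs j hj
    cases k with
    | zero => simp [combsA] at hjs; subst hjs; simp at hj
    | succ k => simp [combsA] at hjs
  | cons x t ih =>
    intro k js hjs j hj
    cases k with
    | zero =>
      simp [combsA] at hjs; subst hjs; simp at hj
    | succ k =>
      simp only [combsA, List.mem_append, List.mem_map] at hjs
      rcases hjs with ⟨s, hs, rfl⟩ | hjs
      · rcases List.mem_cons.mp hj with rfl | hj
        · simp
        · exact List.mem_cons_of_mem _ (ih k s hs j hj)
      · exact List.mem_cons_of_mem _ (ih (k + 1) js hjs j hj)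

theorem pyRange_zero_succ (n : Nat) :
    PySem.List.pyRange 0 ((n : Int) + 1) 1 =
      0 :: (PySem.List.pyRange 0 (n : Int) 1).map (fun j => j + 1) := by
  rw [PySem.List.pyRange_one, PySem.List.pyRange_one]
  have h1 : (((n : Int) + 1) - 0).toNat = n + 1 := by omega
  have h2 : (((n : Int)) - 0).toNat = n := by omega
  rw [h1, h2, List.range_succ_eq_map]
  simp [List.map_map, Function.comp]

theorem main_lemma (lst : List Int) : ∀ (k : Nat),
    (combsA (PySem.List.pyRange 0 (lst.length : Int) 1) k).map (fun idxs => kfA 0 lst idxs)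
      = goB lst (k : Int) := by
  induction lst with
  | nil =>
    intro k
    cases k with
    | zero => simp [combsA, kfA, goB]
    | succ k =>
      have : ((k : Int) + 1) ≠ 0 := by omega
      simp [combsA, goB, this]
  | cons x xs ih =>
    intro k
    cases k with
    | zero =>
      simp [combsA, kfA_nil_idxs, goB_zero, goB]
    | succ k =>
      have hlen : ((x :: xs).length : Int) = (xs.length : Int) + 1 := by simp
      rw [hlen, pyRange_zero_succ]
      rw [show combsA (0 :: (PySem.List.pyRange 0 (xs.length : Int) 1).map (fun j => j + 1)) (k+1)
            = (combsA ((PySem.List.pyRange 0 (xs.length : Int) 1).map (fun j => j + 1)) k).map (fun t => (0:Int) :: t)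
              ++ combsA ((PySem.List.pyRange 0 (xs.length : Int) 1).map (fun j => j + 1)) (k+1) from rfl]
      rw [combsA_map_add_one, combsA_map_add_one, List.map_append, List.map_map, List.map_map, List.map_map]
      simp only [Function.comp_def]
      have hfirst :
          (combsA (PySem.List.pyRange 0 (xs.length : Int) 1) k).map
            (fun js => kfA 0 (x :: xs) ((0:Int) :: js.map (fun j => j + 1)))
          = (combsA (PySem.List.pyRange 0 (xs.length : Int) 1) k).map (fun js => kfA 0 xs js) := by
        apply List.map_congr_left
        intro js _
        have e1 : kfA 0 (x :: xs) ((0:Int) :: js.map (fun j => j + 1))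
            = kfA (0 + 1) xs ((0:Int) :: js.map (fun j => j + 1)) := by
          simp [kfA]
        rw [e1, kfA_skip_lt xs (0 + 1) 0 _ (by omega), kfA_shift xs 0 js]
      have hsecond :
          (combsA (PySem.List.pyRange 0 (xs.length : Int) 1) (k+1)).map
            (fun js => kfA 0 (x :: xs) (js.map (fun j => j + 1)))
          = (combsA (PySem.List.pyRange 0 (xs.length : Int) 1) (k+1)).map
              (fun js => x :: kfA 0 xs js) := by
        apply List.map_congr_left
        intro js hjs
        have h0 : (0:Int) ∉ js.map (fun j => j + 1) := by
          intro h
          rcases List.mem_map.mp h with ⟨b, hb, hbe⟩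
          have hbmem := mem_mem_combsA _ (k+1) js hjs b hb
          have : (0:Int) ≤ b := (PySem.List.mem_pyRange_one.mp hbmem).1
          omega
        have e1 : kfA 0 (x :: xs) (js.map (fun j => j + 1))
            = x :: kfA (0 + 1) xs (js.map (fun j => j + 1)) := by
          simp [kfA, h0]
        rw [e1, kfA_shift xs 0 js]
      rw [hfirst, hsecond]
      have hsplit : (combsA (PySem.List.pyRange 0 (xs.length : Int) 1) (k+1)).map
            (fun js => x :: kfA 0 xs js)
          = ((combsA (PySem.List.pyRange 0 (xs.length : Int) 1) (k+1)).map
              (fun js => kfA 0 xs js)).map (fun r => x :: r) := by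
        simp [List.map_map]
      rw [hsplit, ih k, ih (k+1)]
      have hk1 : ((k:Int) + 1 : Int) > 0 := by omega
      have hcast : (((k+1 : Nat)) : Int) = (k : Int) + 1 := by push_cast; ring
      rw [hcast]
      simp [goB, hk1, show ((k:Int) + 1) - 1 = (k:Int) from by ring]

-- ===== VERDICT (by name: the statement is the Claim_ definition above) =====
theorem all_rems_spec : Claim_equal_all_rems := by
  intro lst sz _ hpre
  unfold Pre_all_rems at hpre
  unfold Spec_all_rems all_rems all_rems_alt
  have hneg : ¬ sz < 0 := by omega
  simp only [hneg, if_false]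
  have hfix : (fun (idxs : List Int) =>
      (PySem.List.enumerate lst 0).foldl
        (fun res p => if p.1 ∉ idxs then res ++ [p.2] else res) ([] : List Int))
      = fun idxs => kfA 0 lst idxs := by
    funext idxs
    simpa using foldl_eq_kfA lst 0 idxs []
  rw [hfix, main_lemma lst sz.toNat, Int.toNat_of_nonneg hpre]
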